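-- pv_equiv track=rewrite | github.com/IrinaMBejan/RNN-Homeworks | h1.py | compute_minors
-- ===== SOURCE A (Python) =====
-- def compute_minors(mat):
--     minors = []
--     for i in range(3):
--         mrow = []
--         for j in range(3):
--             det = []
--             for im in range(3):
--                 if im == i:
--                     continue
--                 det_row = []
--                 for jm in range(3):
--                     if jm == j:
--                         continue
--                     det_row.append(mat[im][jm])
--                 det.append(det_row)
--             det = det[0][0] * det[1][1] - det[0][1] * det[1][0]
--             mrow.append(det)
--         minors.append(mrow)
--
--     return minors
-- ===== SOURCE B (Python) =====
-- def compute_minors(mat):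
--     comp = [(1, 2), (0, 2), (0, 1)]  # the two indices of {0,1,2} complementary to 0,1,2
--     minors = []
--     for r0, r1 in comp:
--         minors.append([mat[r0][c0] * mat[r1][c1] - mat[r0][c1] * mat[r1][c0]
--                        for c0, c1 in comp])
--     return minors
-- ===== Notes on version B (the rewrite author's own statement) =====
-- stated objective: simpler
-- what changed: Replaces the two inner submatrix-building loops with a fixed table of complementary index pairs and a direct 2x2 determinant formula, so no intermediate submatrix lists are built.
import Mathlib
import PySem

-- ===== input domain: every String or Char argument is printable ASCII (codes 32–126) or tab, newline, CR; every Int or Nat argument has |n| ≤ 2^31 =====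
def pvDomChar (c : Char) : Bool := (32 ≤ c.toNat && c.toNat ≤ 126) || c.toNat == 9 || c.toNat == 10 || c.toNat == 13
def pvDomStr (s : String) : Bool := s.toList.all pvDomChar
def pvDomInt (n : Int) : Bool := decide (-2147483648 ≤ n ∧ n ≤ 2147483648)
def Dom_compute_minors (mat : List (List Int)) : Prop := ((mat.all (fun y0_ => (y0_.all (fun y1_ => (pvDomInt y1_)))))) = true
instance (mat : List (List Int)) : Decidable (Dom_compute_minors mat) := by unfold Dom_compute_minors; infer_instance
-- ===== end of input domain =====

-- B replaces A's two inner submatrix-building loops by a fixed table of complementary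
-- index pairs and a direct 2x2 determinant formula (objective: simpler).

-- shared indexing helper: mat[i][j]; the .getD defaults are unreachable under Pre_
def pvIdx (mat : List (List Int)) (i j : Int) : Int :=
  (PySem.List.pyGet? ((PySem.List.pyGet? mat i).getD []) j).getD 0

-- ===== PORT A =====
def compute_minors (mat : List (List Int)) : List (List Int) :=
  (PySem.List.pyRange 0 3 1).foldl (fun minors i =>
    minors ++ [(PySem.List.pyRange 0 3 1).foldl (fun mrow j =>
      let det : List (List Int) :=
        (PySem.List.pyRange 0 3 1).foldl (fun det im =>
          if im == i then det else
          det ++ [(PySem.List.pyRange 0 3 1).foldl (fun dr jm =>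
            if jm == j then dr else dr ++ [pvIdx mat im jm]) []]) []
      let d := pvIdx det 0 0 * pvIdx det 1 1 - pvIdx det 0 1 * pvIdx det 1 0
      mrow ++ [d]) []]) []

-- ===== PORT B =====
def compute_minors_alt (mat : List (List Int)) : List (List Int) :=
  let comp : List (Int × Int) := [(1, 2), (0, 2), (0, 1)]
  comp.foldl (fun minors rc =>
    minors ++ [comp.map (fun cc =>
      pvIdx mat rc.1 cc.1 * pvIdx mat rc.2 cc.2 -
      pvIdx mat rc.1 cc.2 * pvIdx mat rc.2 cc.1)]) []

-- ===== PRECONDITION & SPEC =====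
-- Pre_: A raises IndexError unless mat has at least 3 rows each of whose first 3 rows has at least 3 entries
def Pre_compute_minors (mat : List (List Int)) : Prop :=
  3 ≤ mat.length ∧ ∀ r ∈ mat.take 3, 3 ≤ r.length
instance (mat : List (List Int)) : Decidable (Pre_compute_minors mat) := by
  unfold Pre_compute_minors; infer_instance
def pvWitness_compute_minors : List (List Int) := [[1, 2, 3], [4, 5, 6], [7, 8, 10]]

def Spec_compute_minors (mat : List (List Int)) (out : List (List Int)) : Prop := out = compute_minors_alt mat
instance (mat : List (List Int)) (out : List (List Int)) : Decidable (Spec_compute_minors mat out) := by unfold Spec_compute_minors; infer_instance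

-- ===== CLAIM (what is proved, stated in full; the proofs are below) =====
def Claim_equal_compute_minors : Prop := ∀ (mat : List (List Int)), Dom_compute_minors mat → Pre_compute_minors mat → Spec_compute_minors mat (compute_minors mat)

-- ===== LEMMAS AND PROOFS =====
theorem pvg1 {α : Type} (x y : α) (xs : List α) : PySem.List.pyGet? (x::y::xs) 1 = some y := by
  simp [PySem.List.pyGet?, PySem.List.pyIdx?]
theorem pvg2 {α : Type} (x y z : α) (xs : List α) : PySem.List.pyGet? (x::y::z::xs) 2 = some z := by
  simp [PySem.List.pyGet?, PySem.List.pyIdx?]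
  rw [if_pos (by omega)]
  rfl

-- ===== VERDICT (by name: the statement is the Claim_ definition above) =====
theorem compute_minors_spec : Claim_equal_compute_minors := by
  intro mat _ hpre
  obtain ⟨hlen, hrows⟩ := hpre
  match mat, hlen with
  | r0 :: r1 :: r2 :: t, _ =>
    have h0 : 3 ≤ r0.length := hrows r0 (by simp)
    have h1 : 3 ≤ r1.length := hrows r1 (by simp)
    have h2 : 3 ≤ r2.length := hrows r2 (by simp)
    match r0, h0 with
    | a0 :: b0 :: c0 :: t0, _ =>
    match r1, h1 with
    | a1 :: b1 :: c1 :: t1, _ =>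
    match r2, h2 with
    | a2 :: b2 :: c2 :: t2, _ =>
      show Spec_compute_minors _ _
      unfold Spec_compute_minors compute_minors compute_minors_alt pvIdx
      simp [PySem.List.pyRange, List.range_succ, pvg1, pvg2]
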